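-- pv_equiv track=rewrite | github.com/madhu007M/Medical-Report-Summarization-Translation | backend/app/modules/translation_module.py | normalize_target_language
-- ===== SOURCE A (Python) =====
-- from typing import Dict, List
--
-- LANGUAGE_MAP: Dict[str, str] = {
--     "en": "English",
--     "hi": "Hindi (हिन्दी)",
--     "kn": "Kannada (ಕನ್ನಡ)",
--     "ta": "Tamil (தமிழ்)",
--     "te": "Telugu (తెలుగు)",
--     "mr": "Marathi (मराठी)",
--     "bn": "Bengali (বাংলা)",
-- }
--
-- _LANGUAGE_ALIASES: Dict[str, str] = {
--     "english": "en",
--     "en-us": "en",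
--     "en-in": "en",
--     "common": "en",
--     "simple": "en",
--     "plain": "en",
--     "hindi": "hi",
--     "kannada": "kn",
--     "tamil": "ta",
--     "telugu": "te",
--     "marathi": "mr",
--     "bengali": "bn",
--     "bangla": "bn",
-- }
--
-- def normalize_target_language(target_language: str, translation_models: Dict[str, str]) -> str:
--     """Normalize human-friendly language input to a configured language code.
--
--     Accepts language codes ("hi"), language names ("Hindi"), locale-like values
--     ("en-IN") and aliases ("common", "simple"). Falls back to English when
--     available, otherwise to the first configured language.
--     """
--     if not target_language:
--         return "en" if "en" in translation_models else next(iter(translation_models), "en")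
--
--     raw = target_language.strip().lower()
--     if raw in translation_models:
--         return raw
--
--     # Normalize locale-like input (e.g., en-IN -> en).
--     if "-" in raw:
--         base = raw.split("-", 1)[0]
--         if base in translation_models:
--             return base
--
--     # Match exact aliases first.
--     alias_code = _LANGUAGE_ALIASES.get(raw)
--     if alias_code and alias_code in translation_models:
--         return alias_code
--
--     # Match by display-name token before parenthesis (e.g., "Hindi (हिन्दी)").
--     for code, display_name in LANGUAGE_MAP.items():
--         canonical = display_name.split("(", 1)[0].strip().lower()
--         if raw == canonical and code in translation_models:
--             return code
--
--     return "en" if "en" in translation_models else next(iter(translation_models), "en")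
-- ===== SOURCE B (Python) =====
-- from typing import Dict, List
--
-- LANGUAGE_MAP: Dict[str, str] = {
--     "en": "English",
--     "hi": "Hindi (हिन्दी)",
--     "kn": "Kannada (ಕನ್ನಡ)",
--     "ta": "Tamil (தமிழ்)",
--     "te": "Telugu (తెలుగు)",
--     "mr": "Marathi (मराठी)",
--     "bn": "Bengali (বাংলা)",
-- }
--
-- _LANGUAGE_ALIASES: Dict[str, str] = {
--     "english": "en",
--     "en-us": "en",
--     "en-in": "en",
--     "common": "en",
--     "simple": "en",
--     "plain": "en",
--     "hindi": "hi",
--     "kannada": "kn",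
--     "tamil": "ta",
--     "telugu": "te",
--     "marathi": "mr",
--     "bengali": "bn",
--     "bangla": "bn",
-- }
--
--
-- def normalize_target_language(target_language: str, translation_models: Dict[str, str]) -> str:
--     """Argmin formulation: scan the configured codes once and pick the one
--     matched by the highest-priority rule (exact > locale base > alias >
--     display name); fall back when no configured code is matched at all."""
--     fallback = "en" if "en" in translation_models else next(iter(translation_models), "en")
--     if not target_language:
--         return fallback
--
--     raw = target_language.strip().lower()
--     base = raw.split("-", 1)[0] if "-" in raw else None
--     alias = _LANGUAGE_ALIASES.get(raw)
--     display = None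
--     for code, name in LANGUAGE_MAP.items():
--         if name.split("(", 1)[0].strip().lower() == raw:
--             display = code
--             break
--
--     def rank(code: str) -> int:
--         if code == raw:
--             return 0
--         if code == base:
--             return 1
--         if code == alias:
--             return 2
--         if code == display:
--             return 3
--         return 4
--
--     best = min(translation_models, key=rank, default=None)
--     if best is not None and rank(best) < 4:
--         return best
--     return fallback
-- ===== Notes on version B (the rewrite author's own statement) =====
-- stated objective: alternative
-- what changed: Replaces A's sequential cascade of guard branches (each doing its own membership test, plus a scan over LANGUAGE_MAP) with a single argmin scan over translation_models: each configured code is ranked by the highest-priority rule that matches it (exact > locale base > alias > display name) and the first minimum-rank code is returned, with the fallback when no code ranks below 4.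
import Mathlib
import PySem

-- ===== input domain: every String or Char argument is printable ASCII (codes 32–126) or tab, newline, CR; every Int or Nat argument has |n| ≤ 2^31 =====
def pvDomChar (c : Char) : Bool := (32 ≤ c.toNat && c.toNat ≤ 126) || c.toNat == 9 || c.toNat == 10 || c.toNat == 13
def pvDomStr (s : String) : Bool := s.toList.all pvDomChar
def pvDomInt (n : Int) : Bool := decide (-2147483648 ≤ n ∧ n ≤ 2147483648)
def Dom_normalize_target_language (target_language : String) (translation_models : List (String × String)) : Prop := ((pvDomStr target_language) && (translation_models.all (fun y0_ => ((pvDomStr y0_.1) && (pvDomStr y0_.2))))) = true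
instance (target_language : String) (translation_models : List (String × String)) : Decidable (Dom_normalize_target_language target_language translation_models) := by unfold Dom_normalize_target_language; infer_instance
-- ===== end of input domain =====

-- B replaces A's cascade of guard branches with a single argmin scan over translation_models
-- (each configured code ranked by the highest-priority matching rule); objective: alternative decomposition.

-- shared module constants (module-level data in the Python source, used by both versions)
def pyLANGUAGE_MAP : List (String × String) :=
  [("en", "English"), ("hi", "Hindi (हिन्दी)"), ("kn", "Kannada (ಕನ್ನಡ)"), ("ta", "Tamil (தமிழ்)"),
   ("te", "Telugu (తెలుగు)"), ("mr", "Marathi (मराठी)"), ("bn", "Bengali (বাংলা)")]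

def pyALIASES : PySem.Dict String String :=
  PySem.Dict.mk
    [("english", "en"), ("en-us", "en"), ("en-in", "en"), ("common", "en"), ("simple", "en"),
     ("plain", "en"), ("hindi", "hi"), ("kannada", "kn"), ("tamil", "ta"), ("telugu", "te"),
     ("marathi", "mr"), ("bengali", "bn"), ("bangla", "bn")]

-- 'k in translation_models' (dict key membership)
def keyMem (d : List (String × String)) (k : String) : Bool := d.any (fun p => p.1 == k)

-- '"en" if "en" in translation_models else next(iter(translation_models), "en")' (both versions use this expression)
def fallbackEn (d : List (String × String)) : String :=
  if keyMem d "en" then "en" else match d with | [] => "en" | (k, _) :: _ => k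

-- s.split(sep, 1)[0]; sep ≠ "" so splitMax? is some and its result is nonempty, hence the defaults never fire
def headSplit (s : String) (sep : String) : String :=
  (((PySem.Str.splitMax? s sep 1).getD []).headD "")

-- display_name.split("(", 1)[0].strip().lower()
def canon (s : String) : String := PySem.Str.lower (PySem.Str.strip (headSplit s "("))

-- ===== PORT A =====
-- the 'for code, display_name in LANGUAGE_MAP.items(): …' loop; returns the code it would 'return', none = fall through
def displayLoop (raw : String) (models : List (String × String)) : List (String × String) → Option String
  | [] => none
  | (code, display) :: rest =>
      if raw == canon display && keyMem models code then some code
      else displayLoop raw models rest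

-- the function body after 'raw' has been computed
def aCore (raw : String) (models : List (String × String)) : String :=
  if keyMem models raw then raw
  else if PySem.Str.isIn "-" raw && keyMem models (headSplit raw "-") then headSplit raw "-"
  else
    match PySem.Dict.get? pyALIASES raw with
    | some c =>
        if (c != "") && keyMem models c then c
        else match displayLoop raw models pyLANGUAGE_MAP with
             | some code => code
             | none => fallbackEn models
    | none =>
        match displayLoop raw models pyLANGUAGE_MAP with
        | some code => code
        | none => fallbackEn models

def normalize_target_language (target_language : String) (translation_models : List (String × String)) : String :=
  if target_language == "" then fallbackEn translation_models
  else aCore (PySem.Str.lower (PySem.Str.strip target_language)) translation_models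

-- ===== PORT B =====
-- B's 'for code, name in LANGUAGE_MAP.items(): … break' loop computing 'display' (first canon match, no membership test)
def dispCodeB (raw : String) : Option String :=
  (pyLANGUAGE_MAP.find? (fun p => canon p.2 == raw)).map Prod.fst

-- B's 'rank(code)' closure; 'code == base' with base=None (no dash) can never be true, hence the dash guard
def rkB (raw : String) (k : String) : Nat :=
  if k == raw then 0
  else if PySem.Str.isIn "-" raw && (k == headSplit raw "-") then 1
  else if PySem.Dict.get? pyALIASES raw == some k then 2
  else if dispCodeB raw == some k then 3
  else 4

-- 'min(translation_models, key=rank, default=None)': first key of minimal rank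
def pickMin (rk : String → Nat) (l : List (String × String)) : Option String :=
  l.foldl (fun best p =>
    match best with
    | none => some p.1
    | some b => if rk p.1 < rk b then some p.1 else some b) none

def bCore (raw : String) (models : List (String × String)) : String :=
  match pickMin (rkB raw) models with
  | some b => if rkB raw b < 4 then b else fallbackEn models
  | none => fallbackEn models

def normalize_target_language_alt (target_language : String) (translation_models : List (String × String)) : String :=
  if target_language == "" then fallbackEn translation_models
  else bCore (PySem.Str.lower (PySem.Str.strip target_language)) translation_models

-- ===== PRECONDITION & SPEC =====
def Spec_normalize_target_language (target_language : String) (translation_models : List (String × String)) (out : String) : Prop := out = normalize_target_language_alt target_language translation_models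
instance (target_language : String) (translation_models : List (String × String)) (out : String) : Decidable (Spec_normalize_target_language target_language translation_models out) := by unfold Spec_normalize_target_language; infer_instance

-- ===== CLAIM (what is proved, stated in full; the proofs are below) =====
def Claim_equal_normalize_target_language : Prop := ∀ (target_language : String) (translation_models : List (String × String)), Dom_normalize_target_language target_language translation_models → Spec_normalize_target_language target_language translation_models (normalize_target_language target_language translation_models)

-- ===== LEMMAS AND PROOFS =====

-- rank of an optional pick (none = 5, worse than any real rank)
def rkO (rk : String → Nat) : Option String → Nat
  | none => 5
  | some b => rk b

-- minimum rank over the keys of a model list (5 for the empty list)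
def minR (rk : String → Nat) : List (String × String) → Nat
  | [] => 5
  | p :: l => min (rk p.1) (minR rk l)

theorem rkB_le (raw k : String) : rkB raw k ≤ 4 := by
  unfold rkB; split_ifs <;> omega

theorem keyMem_iff (l : List (String × String)) (k : String) :
    keyMem l k = true ↔ ∃ p ∈ l, p.1 = k := by
  simp [keyMem, List.any_eq_true, beq_iff_eq]

theorem minR_le_of_mem {rk : String → Nat} {l : List (String × String)} {p : String × String}
    (hp : p ∈ l) : minR rk l ≤ rk p.1 := by
  induction l with
  | nil => cases hp
  | cons q l ih =>
    rcases List.mem_cons.1 hp with h | h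
    · subst h; simp [minR]
    · simp [minR]; exact Or.inr (ih h)

theorem le_minR {rk : String → Nat} {l : List (String × String)} {v : Nat}
    (h5 : v ≤ 5) (h : ∀ p ∈ l, v ≤ rk p.1) : v ≤ minR rk l := by
  induction l with
  | nil => simpa [minR]
  | cons q l ih =>
    simp [minR]
    exact ⟨h q (List.mem_cons_self), ih (fun p hp => h p (List.mem_cons_of_mem _ hp))⟩

theorem pickMin_aux (rk : String → Nat) (h4 : ∀ k, rk k ≤ 4)
    (l : List (String × String)) :
    ∀ acc, rkO rk (l.foldl (fun best p =>
      match best with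
      | none => some p.1
      | some b => if rk p.1 < rk b then some p.1 else some b) acc)
      = min (rkO rk acc) (minR rk l) := by
  induction l with
  | nil =>
    intro acc
    have h : rkO rk acc ≤ 5 := by
      cases acc with
      | none => simp [rkO]
      | some b => exact le_trans (h4 b) (by omega)
    simp [minR, Nat.min_eq_left h]
  | cons p l ih =>
    intro acc
    rw [List.foldl_cons, ih]
    have hstep : rkO rk (match acc with
        | none => some p.1
        | some b => if rk p.1 < rk b then some p.1 else some b) = min (rkO rk acc) (rk p.1) := by
      cases acc with
      | none => simp [rkO, Nat.min_eq_right (show rk p.1 ≤ 5 from le_trans (h4 p.1) (by omega))]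
      | some b =>
        by_cases h : rk p.1 < rk b
        · simp [rkO, h, Nat.min_eq_right (le_of_lt h)]
        · simp [rkO, h, Nat.min_eq_left (le_of_not_gt h)]
    rw [hstep, Nat.min_assoc]
    rfl

theorem pickMin_rank (raw : String) (l : List (String × String)) :
    rkO (rkB raw) (pickMin (rkB raw) l) = minR (rkB raw) l := by
  unfold pickMin
  rw [pickMin_aux (rkB raw) (rkB_le raw) l none]
  have hle : minR (rkB raw) l ≤ 5 := by
    cases l with
    | nil => simp [minR]
    | cons p l => exact le_trans (Nat.min_le_left _ _) (le_trans (rkB_le raw p.1) (by omega))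
  simpa [rkO] using Nat.min_eq_right hle

-- every alias value is a nonempty code
theorem alias_ne_empty (raw a : String) (h : PySem.Dict.get? pyALIASES raw = some a) : a ≠ "" := by
  have hm := PySem.Dict.mem_items_of_get?_eq_some pyALIASES h
  simp only [pyALIASES, List.mem_cons, List.not_mem_nil, or_false,
    Prod.mk.injEq] at hm
  rcases hm with ⟨-, rfl⟩|⟨-, rfl⟩|⟨-, rfl⟩|⟨-, rfl⟩|⟨-, rfl⟩|⟨-, rfl⟩|⟨-, rfl⟩|⟨-, rfl⟩|⟨-, rfl⟩|⟨-, rfl⟩|⟨-, rfl⟩|⟨-, rfl⟩|⟨-, rfl⟩ <;> decide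

-- A's display loop as B's display lookup plus a membership test
theorem display_eq (raw : String) (models : List (String × String)) :
    displayLoop raw models pyLANGUAGE_MAP
      = match dispCodeB raw with
        | some c => if keyMem models c then some c else none
        | none => none := by
  have h1 : canon "English" = "english" := by decide
  have h2 : canon "Hindi (हिन्दी)" = "hindi" := by decide
  have h3 : canon "Kannada (ಕನ್ನಡ)" = "kannada" := by decide
  have h4 : canon "Tamil (தமிழ்)" = "tamil" := by decide
  have h5 : canon "Telugu (తెలుగు)" = "telugu" := by decide
  have h6 : canon "Marathi (मराठी)" = "marathi" := by decide
  have h7 : canon "Bengali (বাংলা)" = "bengali" := by decide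
  simp only [displayLoop, dispCodeB, pyLANGUAGE_MAP, List.find?, h1, h2, h3, h4, h5, h6, h7]
  by_cases e1 : raw = "english"
  · subst e1; cases hk : keyMem models "en" <;> simp [hk]
  · by_cases e2 : raw = "hindi"
    · subst e2; cases hk : keyMem models "hi" <;> simp [hk]
    · by_cases e3 : raw = "kannada"
      · subst e3; cases hk : keyMem models "kn" <;> simp [hk]
      · by_cases e4 : raw = "tamil"
        · subst e4; cases hk : keyMem models "ta" <;> simp [hk]
        · by_cases e5 : raw = "telugu"
          · subst e5; cases hk : keyMem models "te" <;> simp [hk]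
          · by_cases e6 : raw = "marathi"
            · subst e6; cases hk : keyMem models "mr" <;> simp [hk]
            · by_cases e7 : raw = "bengali"
              · subst e7; cases hk : keyMem models "bn" <;> simp [hk]
              · have f : ∀ s : String, ¬ raw = s → (s == raw) = false ∧ (raw == s) = false :=
                  fun s hs => ⟨beq_eq_false_iff_ne.2 (Ne.symm hs), beq_eq_false_iff_ne.2 hs⟩
                simp [(f _ e1).1, (f _ e1).2, (f _ e2).1, (f _ e2).2, (f _ e3).1, (f _ e3).2,
                  (f _ e4).1, (f _ e4).2, (f _ e5).1, (f _ e5).2, (f _ e6).1, (f _ e6).2,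
                  (f _ e7).1, (f _ e7).2]

theorem keyMem_of_mem {l : List (String × String)} {p : String × String} {k : String}
    (hp : p ∈ l) (he : p.1 = k) : keyMem l k = true := (keyMem_iff l k).2 ⟨p, hp, he⟩

theorem rkB_eq_zero {raw b : String} (h : rkB raw b = 0) : b = raw := by
  unfold rkB at h; split_ifs at h with h1 h2 h3 h4; exact beq_iff_eq.mp h1

theorem rkB_eq_one {raw b : String} (h : rkB raw b = 1) :
    PySem.Str.isIn "-" raw = true ∧ b = headSplit raw "-" := by
  unfold rkB at h
  split_ifs at h with h1 h2 h3 h4 <;>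
    first
      | omega
      | (simp only [Bool.and_eq_true, beq_iff_eq] at h2; exact h2)

theorem optBeq_eq {x : Option String} {b : String} (h : (x == some b) = true) : x = some b := by
  cases x with
  | none => simp at h
  | some y => simpa using h

theorem rkB_eq_two {raw b : String} (h : rkB raw b = 2) :
    PySem.Dict.get? pyALIASES raw = some b := by
  unfold rkB at h; split_ifs at h with h1 h2 h3 h4 <;> first | exact optBeq_eq h3 | omega

theorem rkB_eq_three {raw b : String} (h : rkB raw b = 3) : dispCodeB raw = some b := by
  unfold rkB at h; split_ifs at h with h1 h2 h3 h4 <;> first | exact optBeq_eq h4 | omega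

theorem rkB_self (raw : String) : rkB raw raw = 0 := by simp [rkB]

theorem rkB_base_le {raw : String} (hd : PySem.Str.isIn "-" raw = true) :
    rkB raw (headSplit raw "-") ≤ 1 := by
  unfold rkB; split_ifs with h1 h2 h3 h4 <;> first | omega | exact absurd (by rw [hd]; simp) h2

theorem rkB_alias_le {raw a : String} (h : PySem.Dict.get? pyALIASES raw = some a) :
    rkB raw a ≤ 2 := by
  unfold rkB; split_ifs with h1 h2 h3 h4 <;> first | omega | exact absurd (by rw [h]; simp) h3

theorem rkB_disp_le {raw c : String} (h : dispCodeB raw = some c) : rkB raw c ≤ 3 := by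
  unfold rkB; split_ifs with h1 h2 h3 h4 <;> first | omega | exact absurd (by rw [h]; simp) h4

theorem core_eq (raw : String) (models : List (String × String)) :
    aCore raw models = bCore raw models := by
  unfold aCore bCore
  by_cases h0 : keyMem models raw = true
  · -- branch 1: raw itself is configured
    obtain ⟨p, hp, hpe⟩ := (keyMem_iff models raw).1 h0
    have hm : minR (rkB raw) models = 0 :=
      Nat.le_zero.1 (le_trans (minR_le_of_mem hp) (by rw [hpe, rkB_self]))
    cases hq : pickMin (rkB raw) models with
    | none => have := pickMin_rank raw models; rw [hq, hm] at this; simp [rkO] at this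
    | some b =>
      have hb := pickMin_rank raw models
      rw [hq, hm] at hb
      simp only [rkO] at hb
      cases rkB_eq_zero hb
      simp [h0, rkB_self]
  · -- raw not configured
    have hlb0 : ∀ p ∈ models, 1 ≤ rkB raw p.1 := by
      intro p hp
      rcases Nat.lt_or_ge (rkB raw p.1) 1 with hlt | hge
      · exact absurd (keyMem_of_mem hp (rkB_eq_zero (by omega))) h0
      · exact hge
    by_cases h1 : (PySem.Str.isIn "-" raw && keyMem models (headSplit raw "-")) = true
    · -- branch 2: locale base is configured
      have h1' := h1
      rw [Bool.and_eq_true] at h1'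
      obtain ⟨hd, hkb⟩ := h1'
      obtain ⟨p, hp, hpe⟩ := (keyMem_iff models (headSplit raw "-")).1 hkb
      have hm : minR (rkB raw) models = 1 :=
        Nat.le_antisymm (le_trans (minR_le_of_mem hp) (by rw [hpe]; exact rkB_base_le hd))
          (le_minR (by omega) hlb0)
      cases hq : pickMin (rkB raw) models with
      | none => have := pickMin_rank raw models; rw [hq, hm] at this; simp [rkO] at this
      | some b =>
        have hb := pickMin_rank raw models
        rw [hq, hm] at hb
        simp only [rkO] at hb
        cases rkB_eq_one hb |>.2
        have hdc : PySem.Chars.isIn ['-'] raw.toList = true := by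
          simpa [PySem.Str.isIn] using hd
        simp [h0, hdc, hkb, hb]
    · -- base rule yields nothing
      have hno : ¬ (PySem.Chars.isIn ['-'] raw.toList = true ∧
          keyMem models (headSplit raw "-") = true) := by
        rintro ⟨x, y⟩
        exact h1 (by simp [PySem.Str.isIn, x, y])
      have hlb1 : ∀ p ∈ models, 2 ≤ rkB raw p.1 := by
        intro p hp
        rcases Nat.lt_or_ge (rkB raw p.1) 2 with hlt | hge
        · have h2 : rkB raw p.1 = 1 := by have := hlb0 p hp; omega
          obtain ⟨hd, hbe⟩ := rkB_eq_one h2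
          exact absurd (by rw [hd, keyMem_of_mem hp hbe]; rfl) h1
        · exact hge
      rcases halias : PySem.Dict.get? pyALIASES raw with _ | a
      · -- no alias: display rule or fallback
        have hlb2 : ∀ p ∈ models, 3 ≤ rkB raw p.1 := by
          intro p hp
          rcases Nat.lt_or_ge (rkB raw p.1) 3 with hlt | hge
          · have h2 : rkB raw p.1 = 2 := by have := hlb1 p hp; omega
            rw [rkB_eq_two h2] at halias; cases halias
          · exact hge
        rw [display_eq raw models]
        rcases hdisp : dispCodeB raw with _ | c
        · -- fallback on both sides
          have hlb3 : ∀ p ∈ models, 4 ≤ rkB raw p.1 := by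
            intro p hp
            rcases Nat.lt_or_ge (rkB raw p.1) 4 with hlt | hge
            · have h2 : rkB raw p.1 = 3 := by have := hlb2 p hp; omega
              rw [rkB_eq_three h2] at hdisp; cases hdisp
            · exact hge
          cases hq : pickMin (rkB raw) models with
          | none => simp [h0, hno]
          | some b =>
            have hb := pickMin_rank raw models
            rw [hq] at hb
            simp only [rkO] at hb
            have h4 : 4 ≤ rkB raw b := hb ▸ le_minR (by omega) hlb3
            simp [h0, hno, Nat.not_lt.mpr h4]
        · by_cases hkc : keyMem models c = true
          · -- branch 4: display name is configured
            obtain ⟨p, hp, hpe⟩ := (keyMem_iff models c).1 hkc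
            have hm : minR (rkB raw) models = 3 :=
              Nat.le_antisymm
                (le_trans (minR_le_of_mem hp) (by rw [hpe]; exact rkB_disp_le hdisp))
                (le_minR (by omega) hlb2)
            cases hq : pickMin (rkB raw) models with
            | none => have := pickMin_rank raw models; rw [hq, hm] at this; simp [rkO] at this
            | some b =>
              have hb := pickMin_rank raw models
              rw [hq, hm] at hb
              simp only [rkO] at hb
              have hbe := rkB_eq_three hb
              rw [hdisp] at hbe
              cases hbe
              simp [h0, hno, hkc, hb]
          · -- fallback on both sides
            have hlb3 : ∀ p ∈ models, 4 ≤ rkB raw p.1 := by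
              intro p hp
              rcases Nat.lt_or_ge (rkB raw p.1) 4 with hlt | hge
              · have h2 : rkB raw p.1 = 3 := by have := hlb2 p hp; omega
                have := rkB_eq_three h2
                rw [hdisp] at this
                cases this
                exact absurd (keyMem_of_mem hp rfl) hkc
              · exact hge
            cases hq : pickMin (rkB raw) models with
            | none => simp [h0, hno, hkc]
            | some b =>
              have hb := pickMin_rank raw models
              rw [hq] at hb
              simp only [rkO] at hb
              have h4 : 4 ≤ rkB raw b := hb ▸ le_minR (by omega) hlb3
              simp [h0, hno, hkc, Nat.not_lt.mpr h4]
      · -- alias found (alias values are never empty)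
        have hne := alias_ne_empty raw a halias
        by_cases hka : keyMem models a = true
        · -- branch 3: alias code is configured
          obtain ⟨p, hp, hpe⟩ := (keyMem_iff models a).1 hka
          have hm : minR (rkB raw) models = 2 :=
            Nat.le_antisymm
              (le_trans (minR_le_of_mem hp) (by rw [hpe]; exact rkB_alias_le halias))
              (le_minR (by omega) hlb1)
          cases hq : pickMin (rkB raw) models with
          | none => have := pickMin_rank raw models; rw [hq, hm] at this; simp [rkO] at this
          | some b =>
            have hb := pickMin_rank raw models
            rw [hq, hm] at hb
            simp only [rkO] at hb
            have hbe := rkB_eq_two hb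
            rw [halias] at hbe
            cases hbe
            simp [h0, hno, hne, hka, hb]
        · -- alias not configured: display rule or fallback
          have hlb2 : ∀ p ∈ models, 3 ≤ rkB raw p.1 := by
            intro p hp
            rcases Nat.lt_or_ge (rkB raw p.1) 3 with hlt | hge
            · have h2 : rkB raw p.1 = 2 := by have := hlb1 p hp; omega
              have := rkB_eq_two h2
              rw [halias] at this
              cases this
              exact absurd (keyMem_of_mem hp rfl) hka
            · exact hge
          rw [display_eq raw models]
          rcases hdisp : dispCodeB raw with _ | c
          · have hlb3 : ∀ p ∈ models, 4 ≤ rkB raw p.1 := by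
              intro p hp
              rcases Nat.lt_or_ge (rkB raw p.1) 4 with hlt | hge
              · have h2 : rkB raw p.1 = 3 := by have := hlb2 p hp; omega
                rw [rkB_eq_three h2] at hdisp; cases hdisp
              · exact hge
            cases hq : pickMin (rkB raw) models with
            | none => simp [h0, hno, hka]
            | some b =>
              have hb := pickMin_rank raw models
              rw [hq] at hb
              simp only [rkO] at hb
              have h4 : 4 ≤ rkB raw b := hb ▸ le_minR (by omega) hlb3
              simp [h0, hno, hka, Nat.not_lt.mpr h4]
          · by_cases hkc : keyMem models c = true
            · obtain ⟨p, hp, hpe⟩ := (keyMem_iff models c).1 hkc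
              have hm : minR (rkB raw) models = 3 :=
                Nat.le_antisymm
                  (le_trans (minR_le_of_mem hp) (by rw [hpe]; exact rkB_disp_le hdisp))
                  (le_minR (by omega) hlb2)
              cases hq : pickMin (rkB raw) models with
              | none => have := pickMin_rank raw models; rw [hq, hm] at this; simp [rkO] at this
              | some b =>
                have hb := pickMin_rank raw models
                rw [hq, hm] at hb
                simp only [rkO] at hb
                have hbe := rkB_eq_three hb
                rw [hdisp] at hbe
                cases hbe
                simp [h0, hno, hka, hkc, hb]
            · have hlb3 : ∀ p ∈ models, 4 ≤ rkB raw p.1 := by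
                intro p hp
                rcases Nat.lt_or_ge (rkB raw p.1) 4 with hlt | hge
                · have h2 : rkB raw p.1 = 3 := by have := hlb2 p hp; omega
                  have := rkB_eq_three h2
                  rw [hdisp] at this
                  cases this
                  exact absurd (keyMem_of_mem hp rfl) hkc
                · exact hge
              cases hq : pickMin (rkB raw) models with
              | none => simp [h0, hno, hka, hkc]
              | some b =>
                have hb := pickMin_rank raw models
                rw [hq] at hb
                simp only [rkO] at hb
                have h4 : 4 ≤ rkB raw b := hb ▸ le_minR (by omega) hlb3
                simp [h0, hno, hka, hkc, Nat.not_lt.mpr h4]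

-- ===== VERDICT (by name: the statement is the Claim_ definition above) =====
theorem normalize_target_language_spec : Claim_equal_normalize_target_language := by
  intro tl models _
  unfold Spec_normalize_target_language normalize_target_language normalize_target_language_alt
  by_cases h : tl == ""
  · simp [h]
  · simp [h, core_eq]
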